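-- pv_equiv track=rewrite | github.com/vinodkumarhs1962/skinspire_V2 | app/utils/barcode_utils.py | _find_next_ai
-- ===== SOURCE A (Python) =====
-- GS1_APPLICATION_IDENTIFIERS = {
--     '00': {'name': 'SSCC', 'length': 18},
--     '01': {'name': 'GTIN', 'length': 14},
--     '02': {'name': 'CONTENT', 'length': 14},
--     '10': {'name': 'BATCH_LOT', 'length': None},  # Variable length
--     '11': {'name': 'PROD_DATE', 'length': 6},
--     '13': {'name': 'PACK_DATE', 'length': 6},
--     '15': {'name': 'BEST_BEFORE', 'length': 6},
--     '17': {'name': 'EXPIRY_DATE', 'length': 6},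
--     '20': {'name': 'VARIANT', 'length': 2},
--     '21': {'name': 'SERIAL', 'length': None},  # Variable length
--     '30': {'name': 'VAR_COUNT', 'length': None},
--     '310': {'name': 'NET_WEIGHT_KG', 'length': 6},
--     '37': {'name': 'COUNT', 'length': None},
--     '240': {'name': 'ADDITIONAL_ID', 'length': None},
--     '241': {'name': 'CUSTOMER_PART_NO', 'length': None},
--     '250': {'name': 'SECONDARY_SERIAL', 'length': None},
--     '251': {'name': 'REF_TO_SOURCE', 'length': None},
--     '400': {'name': 'ORDER_NUMBER', 'length': None},
--     '410': {'name': 'SHIP_TO_LOC', 'length': 13},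
--     '414': {'name': 'LOC_NO', 'length': 13},
--     '420': {'name': 'SHIP_TO_POSTAL', 'length': None},
--     '421': {'name': 'SHIP_TO_COUNTRY', 'length': None},
--     '8020': {'name': 'PAYMENT_SLIP_REF', 'length': None},
-- }
--
-- def _find_next_ai(data: str, start_pos: int) -> int:
--     """Find position of next Application Identifier in data"""
--     for i in range(start_pos, len(data)):
--         for ai_len in [4, 3, 2]:
--             if i + ai_len <= len(data):
--                 potential_ai = data[i:i + ai_len]
--                 if potential_ai in GS1_APPLICATION_IDENTIFIERS:
--                     return i
--     return len(data)
-- ===== SOURCE B (Python) =====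
-- # B: instead of scanning every position with 4/3/2-char window tests against the dict,
-- # locate each AI key's first occurrence at or after start_pos with str.find and
-- # return the smallest such position (len(data) if no key occurs).
-- _GS1_AI_KEYS = "00 01 02 10 11 13 15 17 20 21 30 310 37 240 241 250 251 400 410 414 420 421 8020".split()
--
-- def _find_next_ai(data: str, start_pos: int) -> int:
--     """Find position of next Application Identifier in data."""
--     best = len(data)
--     for ai in _GS1_AI_KEYS:
--         j = data.find(ai, start_pos)
--         if j != -1 and j < best:
--             best = j
--     return best
-- ===== Notes on version B (the rewrite author's own statement) =====
-- stated objective: faster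
-- what changed: Replaces A's per-position scan testing window lengths 4/3/2 against the dict at every index by one str.find(ai, start_pos) per AI key over a plain key list, returning the smallest hit position (len(data) if none).
-- outside the precondition, e.g. on _find_next_ai('0000ab', -6): A returns -6, B returns 0; on _find_next_ai('00', -1): A returns 0, B returns 2
import Mathlib
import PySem

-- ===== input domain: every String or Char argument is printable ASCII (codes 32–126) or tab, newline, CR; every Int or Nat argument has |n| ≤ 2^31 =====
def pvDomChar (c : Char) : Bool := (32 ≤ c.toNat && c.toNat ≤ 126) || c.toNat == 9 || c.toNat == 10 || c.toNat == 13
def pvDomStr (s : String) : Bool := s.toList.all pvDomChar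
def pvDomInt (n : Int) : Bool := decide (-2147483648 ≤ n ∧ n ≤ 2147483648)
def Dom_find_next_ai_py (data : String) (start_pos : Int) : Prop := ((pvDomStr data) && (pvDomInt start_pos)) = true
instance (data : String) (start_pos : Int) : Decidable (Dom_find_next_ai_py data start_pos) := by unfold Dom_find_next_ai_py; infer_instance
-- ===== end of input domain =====

-- B replaces A's per-position scan over window lengths 4/3/2 by one str.find per AI key
-- over a plain key list (taking the smallest hit position); equal return values on every
-- input with start_pos ≥ 0 (Pre_ below excludes negative start_pos).

-- ===== PORT A =====
-- module constant GS1_APPLICATION_IDENTIFIERS; the inner dicts {'name': …, 'length': …}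
-- are represented as pairs (name, length) since only the KEYS are used by this function
def gs1AIs : PySem.Dict String (String × Option Int) := PySem.Dict.ofList [
  ("00", ("SSCC", some 18)), ("01", ("GTIN", some 14)), ("02", ("CONTENT", some 14)),
  ("10", ("BATCH_LOT", none)), ("11", ("PROD_DATE", some 6)), ("13", ("PACK_DATE", some 6)),
  ("15", ("BEST_BEFORE", some 6)), ("17", ("EXPIRY_DATE", some 6)), ("20", ("VARIANT", some 2)),
  ("21", ("SERIAL", none)), ("30", ("VAR_COUNT", none)), ("310", ("NET_WEIGHT_KG", some 6)),
  ("37", ("COUNT", none)), ("240", ("ADDITIONAL_ID", none)), ("241", ("CUSTOMER_PART_NO", none)),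
  ("250", ("SECONDARY_SERIAL", none)), ("251", ("REF_TO_SOURCE", none)),
  ("400", ("ORDER_NUMBER", none)), ("410", ("SHIP_TO_LOC", some 13)), ("414", ("LOC_NO", some 13)),
  ("420", ("SHIP_TO_POSTAL", none)), ("421", ("SHIP_TO_COUNTRY", none)),
  ("8020", ("PAYMENT_SLIP_REF", none))]

-- inner loop 'for ai_len in [4, 3, 2]': returns 'some i' on A's early 'return i'
def aiInner (data : String) (n i : Int) : List Int → Option Int
  | [] => none
  | L :: rest =>
    if i + L ≤ n then
      if gs1AIs.contains (PySem.Str.slice data (some i) (some (i + L))) then some i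
      else aiInner data n i rest
    else aiInner data n i rest

-- outer loop 'for i in range(start_pos, len(data))'
def aiScan (data : String) (n : Int) : List Int → Int
  | [] => n
  | i :: rest =>
    match aiInner data n i [4, 3, 2] with
    | some r => r
    | none => aiScan data n rest

def find_next_ai_py (data : String) (start_pos : Int) : Int :=
  aiScan data (PySem.Str.len data) (PySem.List.pyRange start_pos (PySem.Str.len data) 1)

-- ===== PORT B =====
-- Source B's module constant _GS1_AI_KEYS = "… space-separated keys …".split()
def gs1KeysB : List String :=
  PySem.Str.split₀ "00 01 02 10 11 13 15 17 20 21 30 310 37 240 241 250 251 400 410 414 420 421 8020"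

def find_next_ai_py_alt (data : String) (start_pos : Int) : Int :=
  gs1KeysB.foldl
    (fun best ai =>
      let j := PySem.Str.findFrom data ai start_pos
      if j ≠ -1 ∧ j < best then j else best)
    (PySem.Str.len data)

-- ===== PRECONDITION & SPEC =====
-- Pre_ excludes negative start_pos, outside this helper's natural domain: there A's
-- Python-slice negative-index wraparound can even return a negative position, while B
-- searches from the clamped position as str.find does.
def Pre_find_next_ai_py (data : String) (start_pos : Int) : Prop := 0 ≤ start_pos
instance (data : String) (start_pos : Int) : Decidable (Pre_find_next_ai_py data start_pos) := by unfold Pre_find_next_ai_py; infer_instance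
def pvWitness_find_next_ai_py : String × Int := ("ab0134x", 0)

def Spec_find_next_ai_py (data : String) (start_pos : Int) (out : Int) : Prop := out = find_next_ai_py_alt data start_pos
instance (data : String) (start_pos : Int) (out : Int) : Decidable (Spec_find_next_ai_py data start_pos out) := by unfold Spec_find_next_ai_py; infer_instance

-- ===== CLAIM (what is proved, stated in full; the proofs are below) =====
def Claim_equal_find_next_ai_py : Prop := ∀ (data : String) (start_pos : Int), Dom_find_next_ai_py data start_pos → Pre_find_next_ai_py data start_pos → Spec_find_next_ai_py data start_pos (find_next_ai_py data start_pos)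

-- ===== LEMMAS AND PROOFS =====

-- the 23 AI keys, as a plain list (proof-side view of gs1AIs and gs1KeysB)
def gs1KeyStrings : List String :=
  ["00", "01", "02", "10", "11", "13", "15", "17", "20", "21", "30", "310", "37",
   "240", "241", "250", "251", "400", "410", "414", "420", "421", "8020"]

def hitB (l : List Char) (j : Nat) : Bool := gs1KeyStrings.any (fun k => k.toList.isPrefixOf (l.drop j))

def hitP (l : List Char) (j : Nat) : Prop := ∃ k ∈ gs1KeyStrings, k.toList <+: l.drop j

lemma gs1_keys_eq : gs1AIs.keys = gs1KeyStrings := by decide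

lemma gs1KeysB_eq : gs1KeysB = gs1KeyStrings := by decide

lemma gs1_contains : ∀ k ∈ gs1KeyStrings, gs1AIs.contains k = true := by decide

lemma gs1_len_mem : ∀ k ∈ gs1KeyStrings, k.toList.length = 2 ∨ k.toList.length = 3 ∨ k.toList.length = 4 := by decide

lemma gs1_ne_nil : ∀ k ∈ gs1KeyStrings, k.toList ≠ [] := by decide

lemma hitB_iff (l : List Char) (j : Nat) : hitB l j = true ↔ hitP l j := by
  simp [hitB, hitP, List.isPrefixOf_iff_prefix]

lemma hitP_lt {l : List Char} {j : Nat} (h : hitP l j) : j < l.length := by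
  obtain ⟨k, hk, hpre⟩ := h
  have h1 := hpre.length_le
  have h2 : 0 < k.toList.length := List.length_pos_iff.mpr (gs1_ne_nil k hk)
  rw [List.length_drop] at h1
  omega

lemma slice_toList (data : String) (i : Int) (L : Nat) (h0 : 0 ≤ i) :
    (PySem.Str.slice data (some i) (some (i + (L : Int)))).toList
      = (data.toList.drop i.toNat).take L := by
  rw [PySem.Str.toList_slice, PySem.Chars.slice_eq_listSlice,
    PySem.List.slice_toNat _ h0 (by omega)]
  congr 1
  omega

lemma contains_slice_iff (data : String) (n i : Int) (L : Nat)
    (h0 : 0 ≤ i) (hn : n = (data.toList.length : Int)) :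
    (i + (L : Int) ≤ n ∧ gs1AIs.contains (PySem.Str.slice data (some i) (some (i + (L : Int)))) = true)
      ↔ ∃ k ∈ gs1KeyStrings, k.toList.length = L ∧ k.toList <+: data.toList.drop i.toNat := by
  constructor
  · rintro ⟨hle, hc⟩
    rw [PySem.Dict.contains_iff_mem_keys, gs1_keys_eq] at hc
    refine ⟨_, hc, ?_, ?_⟩
    · rw [slice_toList data i L h0, List.length_take, List.length_drop]
      omega
    · rw [slice_toList data i L h0]
      exact List.take_prefix _ _
  · rintro ⟨k, hk, hlen, hpre⟩
    have hle : L ≤ (data.toList.drop i.toNat).length := hlen ▸ hpre.length_le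
    rw [List.length_drop] at hle
    have hnn : (data.toList.length : Int) = n := hn.symm
    have hL : 0 < L := by have := gs1_len_mem k hk; omega
    refine ⟨by omega, ?_⟩
    have : PySem.Str.slice data (some i) (some (i + (L : Int))) = k := by
      apply String.toList_inj.mp
      rw [slice_toList data i L h0, ← hlen, ← List.prefix_iff_eq_take.mp hpre]
    rw [this]
    exact gs1_contains k hk

lemma hit_iff (data : String) (n i : Int) (h0 : 0 ≤ i) (hn : n = (data.toList.length : Int)) :
    hitP data.toList i.toNat ↔
      ((i + 4 ≤ n ∧ gs1AIs.contains (PySem.Str.slice data (some i) (some (i + 4))) = true) ∨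
       (i + 3 ≤ n ∧ gs1AIs.contains (PySem.Str.slice data (some i) (some (i + 3))) = true) ∨
       (i + 2 ≤ n ∧ gs1AIs.contains (PySem.Str.slice data (some i) (some (i + 2))) = true)) := by
  have e4 := contains_slice_iff data n i 4 h0 hn
  have e3 := contains_slice_iff data n i 3 h0 hn
  have e2 := contains_slice_iff data n i 2 h0 hn
  norm_num at e4 e3 e2
  constructor
  · rintro ⟨k, hk, hp⟩
    rcases gs1_len_mem k hk with h | h | h
    · exact Or.inr (Or.inr (e2.mpr ⟨k, hk, h, hp⟩))
    · exact Or.inr (Or.inl (e3.mpr ⟨k, hk, h, hp⟩))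
    · exact Or.inl (e4.mpr ⟨k, hk, h, hp⟩)
  · rintro (h | h | h)
    · obtain ⟨k, hk, _, hp⟩ := e4.mp h; exact ⟨k, hk, hp⟩
    · obtain ⟨k, hk, _, hp⟩ := e3.mp h; exact ⟨k, hk, hp⟩
    · obtain ⟨k, hk, _, hp⟩ := e2.mp h; exact ⟨k, hk, hp⟩
lemma inner_eq (data : String) (n i : Int) (h0 : 0 ≤ i)
    (hn : n = (data.toList.length : Int)) :
    aiInner data n i [4, 3, 2] = if hitB data.toList i.toNat then some i else none := by
  have hiff := (hitB_iff data.toList i.toNat).trans (hit_iff data n i h0 hn)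
  simp only [aiInner]
  by_cases hb : hitB data.toList i.toNat
  · rw [if_pos hb]
    rcases hiff.mp hb with ⟨h1, h2⟩ | ⟨h1, h2⟩ | ⟨h1, h2⟩ <;> split_ifs <;> simp_all
  · rw [if_neg hb]
    have h4 : ¬(i + 4 ≤ n ∧ gs1AIs.contains (PySem.Str.slice data (some i) (some (i + 4))) = true) :=
      fun h => hb (hiff.mpr (Or.inl h))
    have h3 : ¬(i + 3 ≤ n ∧ gs1AIs.contains (PySem.Str.slice data (some i) (some (i + 3))) = true) :=
      fun h => hb (hiff.mpr (Or.inr (Or.inl h)))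
    have h2 : ¬(i + 2 ≤ n ∧ gs1AIs.contains (PySem.Str.slice data (some i) (some (i + 2))) = true) :=
      fun h => hb (hiff.mpr (Or.inr (Or.inr h)))
    split_ifs <;> first
      | rfl
      | exact absurd ⟨by assumption, by assumption⟩ h4
      | exact absurd ⟨by assumption, by assumption⟩ h3
      | exact absurd ⟨by assumption, by assumption⟩ h2
def GoodFrom (l : List Char) (n a r : Int) : Prop :=
  (r = n ∧ ∀ j : Nat, a ≤ (j : Int) → ¬ hitP l j) ∨
  (0 ≤ r ∧ a ≤ r ∧ hitP l r.toNat ∧ ∀ j : Nat, a ≤ (j : Int) → (j : Int) < r → ¬ hitP l j)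

lemma scan_good (data : String) (n : Int) (hn : n = (data.toList.length : Int)) :
    ∀ (m : Nat) (a : Int), 0 ≤ a → (n - a).toNat = m →
      GoodFrom data.toList n a (aiScan data n (PySem.List.pyRange a n 1)) := by
  intro m
  induction m with
  | zero =>
    intro a h0 hm
    rw [PySem.List.pyRange_one_eq_nil (by omega)]
    refine Or.inl ⟨rfl, fun j hj hhit => ?_⟩
    have := hitP_lt hhit
    omega
  | succ m ih =>
    intro a h0 hm
    have hab : a < n := by omega
    rw [PySem.List.pyRange_one_cons hab]
    show GoodFrom data.toList n a (match aiInner data n a [4,3,2] with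
      | some r => r | none => aiScan data n (PySem.List.pyRange (a+1) n 1))
    rw [inner_eq data n a h0 hn]
    by_cases hb : hitB data.toList a.toNat
    · rw [if_pos hb]
      show GoodFrom data.toList n a a
      exact Or.inr ⟨h0, le_refl a, (hitB_iff _ _).mp hb, fun j hj hj2 _ => by omega⟩
    · rw [if_neg hb]
      show GoodFrom data.toList n a (aiScan data n (PySem.List.pyRange (a+1) n 1))
      have hnot : ¬ hitP data.toList a.toNat := fun h => hb ((hitB_iff _ _).mpr h)
      rcases ih (a + 1) (by omega) (by omega) with ⟨he, hno⟩ | ⟨h1, h2, h3, h4⟩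
      · refine Or.inl ⟨he, fun j hj => ?_⟩
        by_cases hlt : (j : Int) < a + 1
        · have : j = a.toNat := by omega
          rw [this]; exact hnot
        · exact hno j (by omega)
      · refine Or.inr ⟨h1, by omega, h3, fun j hj hj2 => ?_⟩
        by_cases hlt : (j : Int) < a + 1
        · have : j = a.toNat := by omega
          rw [this]; exact hnot
        · exact h4 j (by omega) hj2

lemma findFrom_past (l sub : List Char) (s : Int) (h0 : 0 ≤ s) (h : (l.length : Int) < s) :
    PySem.Chars.findFrom l sub s none = -1 := by
  simp only [PySem.Chars.findFrom]
  split_ifs <;> first | rfl | omega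

lemma fold_props (data : String) (start_pos : Int) :
    ∀ (K : List String) (b : Int),
      (K.foldl (fun best ai =>
          let j := PySem.Str.findFrom data ai start_pos
          if j ≠ -1 ∧ j < best then j else best) b = b ∨
        ∃ k ∈ K, K.foldl (fun best ai =>
          let j := PySem.Str.findFrom data ai start_pos
          if j ≠ -1 ∧ j < best then j else best) b = PySem.Str.findFrom data k start_pos ∧
          PySem.Str.findFrom data k start_pos ≠ -1) ∧
      K.foldl (fun best ai =>
          let j := PySem.Str.findFrom data ai start_pos
          if j ≠ -1 ∧ j < best then j else best) b ≤ b ∧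
      (∀ k ∈ K, PySem.Str.findFrom data k start_pos ≠ -1 →
        K.foldl (fun best ai =>
          let j := PySem.Str.findFrom data ai start_pos
          if j ≠ -1 ∧ j < best then j else best) b ≤ PySem.Str.findFrom data k start_pos) := by
  intro K
  induction K with
  | nil => exact fun b => ⟨Or.inl rfl, le_refl b, fun k hk => absurd hk (List.not_mem_nil)⟩
  | cons k0 K ih =>
    intro b
    simp only [List.foldl_cons]
    set b' := (fun best ai =>
        let j := PySem.Str.findFrom data ai start_pos
        if j ≠ -1 ∧ j < best then j else best) b k0 with hb'
    have hb'' : b' = if PySem.Str.findFrom data k0 start_pos ≠ -1 ∧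
        PySem.Str.findFrom data k0 start_pos < b then PySem.Str.findFrom data k0 start_pos
        else b := by rw [hb']
    obtain ⟨ih1, ih2, ih3⟩ := ih b'
    have hb'le : b' ≤ b := by
      rw [hb'']; split_ifs with h
      · exact le_of_lt h.2
      · exact le_refl b
    refine ⟨?_, le_trans ih2 hb'le, ?_⟩
    · rcases ih1 with h | ⟨k, hk, h1, h2⟩
      · by_cases hc : PySem.Str.findFrom data k0 start_pos ≠ -1 ∧
            PySem.Str.findFrom data k0 start_pos < b
        · exact Or.inr ⟨k0, List.mem_cons_self, by rw [h, hb'', if_pos hc], hc.1⟩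
        · exact Or.inl (by rw [h, hb'', if_neg hc])
      · exact Or.inr ⟨k, List.mem_cons_of_mem k0 hk, h1, h2⟩
    · intro k hk hne
      rcases List.mem_cons.mp hk with rfl | hk'
      · have hl : b' ≤ PySem.Str.findFrom data k start_pos := by
          rw [hb'']; split_ifs with h
          · exact le_refl _
          · rcases not_and_or.mp h with h | h
            · exact absurd hne h
            · omega
        exact le_trans ih2 hl
      · exact ih3 k hk' hne
lemma infix_of_prefix_drop {l k : List Char} {s j : Nat} (hs : s ≤ j)
    (h : k <+: l.drop j) : k <:+: l.drop s := by
  have he : l.drop j = (l.drop s).drop (j - s) := by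
    rw [List.drop_drop]; congr 1; omega
  rw [he] at h
  exact h.isInfix.trans (List.drop_suffix _ _).isInfix

lemma B_good (data : String) (start_pos : Int) (h0 : 0 ≤ start_pos) :
    GoodFrom data.toList (PySem.Str.len data) start_pos (find_next_ai_py_alt data start_pos) := by
  have hn : PySem.Str.len data = (data.toList.length : Int) := by
    simp [PySem.Str.len_eq]
  unfold find_next_ai_py_alt
  rw [gs1KeysB_eq]
  obtain ⟨p1, p2, p3⟩ := fold_props data start_pos gs1KeyStrings (PySem.Str.len data)
  set r := List.foldl (fun best ai =>
      let j := PySem.Str.findFrom data ai start_pos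
      if j ≠ -1 ∧ j < best then j else best) (PySem.Str.len data) gs1KeyStrings with hrdef
  by_cases hbig : (data.toList.length : Int) < start_pos
  · -- start past the end: every find is -1, the fold returns len(data)
    have hall : ∀ k : String, PySem.Str.findFrom data k start_pos = -1 := by
      intro k
      rw [PySem.Str.findFrom_eq]
      exact findFrom_past data.toList k.toList start_pos h0 hbig
    have hr : r = PySem.Str.len data := by
      rcases p1 with h | ⟨k, _, _, h2⟩
      · exact h
      · exact absurd (hall k) h2
    rw [hr]
    refine Or.inl ⟨rfl, fun j hj hhit => ?_⟩
    have := hitP_lt hhit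
    omega
  · have hsle : start_pos.toNat ≤ data.toList.length := by omega
    have hcast : ((start_pos.toNat : Nat) : Int) = start_pos := by omega
    have fEq : ∀ k : String, PySem.Str.findFrom data k start_pos
        = PySem.Chars.findFrom data.toList k.toList ((start_pos.toNat : Nat) : Int) := by
      intro k; rw [PySem.Str.findFrom_eq, hcast]
    have neg1iff : ∀ k : String, PySem.Str.findFrom data k start_pos = -1 ↔
        ¬ k.toList <:+: data.toList.drop start_pos.toNat := by
      intro k; rw [fEq]
      exact PySem.Chars.findFrom_natCast_eq_neg_one_iff data.toList k.toList start_pos.toNat hsle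
    have spec : ∀ k : String, PySem.Str.findFrom data k start_pos ≠ -1 →
        ((start_pos.toNat : Nat) : Int) ≤ PySem.Str.findFrom data k start_pos ∧
        k.toList <+: data.toList.drop (PySem.Str.findFrom data k start_pos).toNat ∧
        ∀ i : Nat, start_pos.toNat ≤ i → i < (PySem.Str.findFrom data k start_pos).toNat →
          ¬ k.toList <+: data.toList.drop i := by
      intro k hne
      have := PySem.Chars.findFrom_natCast_spec data.toList k.toList start_pos.toNat hsle
        (by rw [← fEq]; exact hne)
      rw [← fEq] at this
      exact this
    have hitFind : ∀ j : Nat, start_pos ≤ (j : Int) → hitP data.toList j →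
        ∃ k ∈ gs1KeyStrings, PySem.Str.findFrom data k start_pos ≠ -1 ∧
          PySem.Str.findFrom data k start_pos ≤ (j : Int) := by
      intro j hj hhit
      obtain ⟨k, hk, hpre⟩ := hhit
      have hne : PySem.Str.findFrom data k start_pos ≠ -1 := by
        rw [Ne, neg1iff, not_not]
        exact infix_of_prefix_drop (by omega) hpre
      obtain ⟨hge, _, hmin⟩ := spec k hne
      refine ⟨k, hk, hne, ?_⟩
      by_contra hlt
      exact hmin j (by omega) (by omega) hpre
    by_cases hex : ∃ k ∈ gs1KeyStrings, PySem.Str.findFrom data k start_pos ≠ -1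
    · obtain ⟨k0, hk0, hne0⟩ := hex
      obtain ⟨hge0, hpre0, _⟩ := spec k0 hne0
      have hlt0 : PySem.Str.findFrom data k0 start_pos < PySem.Str.len data := by
        have h1 : (PySem.Str.findFrom data k0 start_pos).toNat < data.toList.length :=
          hitP_lt ⟨k0, hk0, hpre0⟩
        omega
      have hrlt : r < PySem.Str.len data := lt_of_le_of_lt (p3 k0 hk0 hne0) hlt0
      rcases p1 with h | ⟨km, hkm, h1, h2⟩
      · omega
      · obtain ⟨hgem, hprem, _⟩ := spec km h2
        rw [h1] at hrlt ⊢
        refine Or.inr ⟨by omega, by omega, ⟨km, hkm, hprem⟩, fun j hj hj2 hhit => ?_⟩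
        obtain ⟨k', hk', hne', hle'⟩ := hitFind j hj hhit
        have := p3 k' hk' hne'
        omega
    · have hall : ∀ k ∈ gs1KeyStrings, PySem.Str.findFrom data k start_pos = -1 := by
        intro k hk
        by_contra hne
        exact hex ⟨k, hk, hne⟩
      have hr : r = PySem.Str.len data := by
        rcases p1 with h | ⟨k, hk, _, h2⟩
        · exact h
        · exact absurd (hall k hk) h2
      rw [hr]
      refine Or.inl ⟨rfl, fun j hj hhit => ?_⟩
      obtain ⟨k', hk', hne', _⟩ := hitFind j hj hhit
      exact hne' (hall k' hk')

lemma good_unique {l : List Char} {n a r r' : Int}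
    (h : GoodFrom l n a r) (h' : GoodFrom l n a r') : r = r' := by
  rcases h with ⟨he, hno⟩ | ⟨h0, ha, hhit, hmin⟩
  · rcases h' with ⟨he', _⟩ | ⟨h0', ha', hhit', _⟩
    · rw [he, he']
    · exact absurd hhit' (hno r'.toNat (by omega))
  · rcases h' with ⟨he', hno'⟩ | ⟨h0', ha', hhit', hmin'⟩
    · exact absurd hhit (hno' r.toNat (by omega))
    · by_contra hne
      rcases lt_or_gt_of_ne hne with hlt | hlt
      · exact hmin' r.toNat (by omega) (by omega) hhit
      · exact hmin r'.toNat (by omega) (by omega) hhit'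

lemma A_good (data : String) (start_pos : Int) (h0 : 0 ≤ start_pos) :
    GoodFrom data.toList (PySem.Str.len data) start_pos (find_next_ai_py data start_pos) := by
  unfold find_next_ai_py
  exact scan_good data (PySem.Str.len data) (by simp [PySem.Str.len_eq])
    ((PySem.Str.len data) - start_pos).toNat start_pos h0 rfl

-- ===== VERDICT (by name: the statement is the Claim_ definition above) =====
theorem find_next_ai_py_spec : Claim_equal_find_next_ai_py := by
  intro data start_pos _ hpre
  unfold Spec_find_next_ai_py
  exact good_unique (A_good data start_pos hpre) (B_good data start_pos hpre)
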